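-- pv_equiv track=rewrite | github.com/alenmalhas/python | misc/HR_240328_sherlock_and_the_beast.py | find_divisible_num
-- ===== SOURCE A (Python) =====
-- def find_divisible_num(l:int):
--     while l > 0:
--         if l % 5 == 0:
--             return l
--         elif l % 3 ==0:
--             return l
--         l -= 5
--
--     return -1
-- ===== SOURCE B (Python) =====
-- def find_divisible_num(l: int):
--     # Closed form: the loop steps by 5, so l % 5 is invariant; divisibility by 3
--     # is first reached after k0 = (2*l) % 3 steps.
--     if l <= 0:
--         return -1
--     if l % 5 == 0:
--         return l
--     m = l - 5 * ((2 * l) % 3)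
--     return m if m > 0 else -1
-- ===== Notes on version B (the rewrite author's own statement) =====
-- stated objective: alternative
-- what changed: Replaced the step-by-5 scan with a direct modular computation: the first step at which divisibility by three holds is k0 = (2*l) % 3, so the answer is obtained without any loop.
import Mathlib
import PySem

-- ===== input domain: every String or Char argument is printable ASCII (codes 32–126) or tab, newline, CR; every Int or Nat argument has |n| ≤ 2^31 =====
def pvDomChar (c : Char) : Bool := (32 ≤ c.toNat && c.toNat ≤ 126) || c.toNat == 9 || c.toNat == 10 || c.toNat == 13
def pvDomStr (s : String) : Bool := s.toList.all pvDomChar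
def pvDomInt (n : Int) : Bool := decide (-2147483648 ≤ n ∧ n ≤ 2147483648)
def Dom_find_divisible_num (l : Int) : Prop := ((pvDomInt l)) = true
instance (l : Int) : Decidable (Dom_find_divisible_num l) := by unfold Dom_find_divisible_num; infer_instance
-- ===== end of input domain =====

-- ===== PORT A =====
-- B computes the answer by a closed-form modular computation instead of A's step-by-5 loop (alternative decomposition; A's loop runs at most a few steps anyway).
def find_divisible_num (l : Int) : Int :=
  if l > 0 then
    if PySem.Int.mod l 5 = 0 then l
    else if PySem.Int.mod l 3 = 0 then l
    else find_divisible_num (l - 5)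
  else -1
termination_by l.toNat
decreasing_by omega

-- ===== PORT B =====
def find_divisible_num_alt (l : Int) : Int :=
  if l ≤ 0 then -1
  else if PySem.Int.mod l 5 = 0 then l
  else
    let m := l - 5 * PySem.Int.mod (2 * l) 3
    if m > 0 then m else -1

-- ===== PRECONDITION & SPEC =====
def Spec_find_divisible_num (l : Int) (out : Int) : Prop := out = find_divisible_num_alt l
instance (l : Int) (out : Int) : Decidable (Spec_find_divisible_num l out) := by unfold Spec_find_divisible_num; infer_instance

-- ===== CLAIM (what is proved, stated in full; the proofs are below) =====
def Claim_equal_find_divisible_num : Prop := ∀ (l : Int), Dom_find_divisible_num l → Spec_find_divisible_num l (find_divisible_num l)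

-- ===== LEMMAS AND PROOFS =====

-- ===== VERDICT (by name: the statement is the Claim_ definition above) =====
-- B is invariant under one loop step of A (when neither divisibility fires and l > 0)
theorem alt_step (l : Int) (hl : 0 < l) (h5 : PySem.Int.mod l 5 ≠ 0)
    (h3 : PySem.Int.mod l 3 ≠ 0) :
    find_divisible_num_alt (l - 5) = find_divisible_num_alt l := by
  rw [PySem.Int.mod_eq_emod_of_pos (by norm_num : (0:Int) < 5)] at h5
  rw [PySem.Int.mod_eq_emod_of_pos (by norm_num : (0:Int) < 3)] at h3
  unfold find_divisible_num_alt
  rw [PySem.Int.mod_eq_emod_of_pos (b := 5) (by norm_num),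
      PySem.Int.mod_eq_emod_of_pos (b := 5) (by norm_num),
      PySem.Int.mod_eq_emod_of_pos (b := 3) (by norm_num),
      PySem.Int.mod_eq_emod_of_pos (b := 3) (by norm_num)]
  dsimp only
  have hk : (2 * l) % 3 ≠ 0 := by omega
  have hk' : (2 * (l - 5)) % 3 = (2 * l) % 3 - 1 := by omega
  split_ifs <;> omega

theorem ab_eq (l : Int) : find_divisible_num l = find_divisible_num_alt l := by
  rw [find_divisible_num]
  split_ifs with h0 h5 h3
  · unfold find_divisible_num_alt
    rw [if_neg (by omega), if_pos h5]
  · unfold find_divisible_num_alt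
    rw [PySem.Int.mod_eq_emod_of_pos (by norm_num : (0:Int) < 3)] at h3
    rw [if_neg (by omega), if_neg h5,
        PySem.Int.mod_eq_emod_of_pos (by norm_num : (0:Int) < 3)]
    have : (2 * l) % 3 = 0 := by omega
    rw [this]
    simp
    omega
  · rw [ab_eq (l - 5)]; exact alt_step l h0 h5 h3
  · unfold find_divisible_num_alt
    rw [if_pos (by omega)]
termination_by l.toNat
decreasing_by omega

theorem find_divisible_num_spec : Claim_equal_find_divisible_num := by
  intro l _; unfold Spec_find_divisible_num; exact ab_eq l
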